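-- pv_equiv track=rewrite | github.com/Andrew-A-A/DSP_tasks | SignalToolkit.py | sharping
-- ===== SOURCE A (Python) =====
-- def sharping(signal):
--     # First derivative : Y(n) = x(n) - x(n-1)
--     first_derivative = []
--
--     # Second derivative : Y(n)= x(n+1) - 2x(n) + x(n-1)
--     second_derivative = []
--     for i in range(0, len(signal)):
--         x_n = signal[i][1]
--         if i == 0:
--             x_min_1 = 0
--         else:
--             x_min_1 = signal[i - 1][1]
--         if i == len(signal) - 1:
--             x_plus_1 = 0
--         else:
--             x_plus_1 = signal[i + 1][1]
--
--         first_derivative.append([i, x_n - x_min_1])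
--         second_derivative.append([i, x_plus_1 - (2 * x_n) + x_min_1])
--     return first_derivative, second_derivative
-- ===== SOURCE B (Python) =====
-- def sharping(sig):
--     # Stage 1: one padded difference list; Stage 2: the second derivative is
--     # the difference of consecutive first differences.
--     xs = [p[1] for p in sig]
--     diffs = [b - a for a, b in zip([0] + xs, xs + [0])]
--     first_derivative = [[i, d] for i, d in enumerate(diffs[:-1])]
--     second_derivative = [[i, b - a] for i, (a, b) in enumerate(zip(diffs, diffs[1:]))]
--     return first_derivative, second_derivative
-- ===== Notes on version B (the rewrite author's own statement) =====
-- stated objective: alternative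
-- what changed: B is staged: it builds one padded difference list diffs (the first derivative plus a trailing boundary term) and then derives the second derivative as the difference of consecutive entries of diffs, instead of A's single loop evaluating the 3-point stencil with boundary conditionals at each index.
import Mathlib
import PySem

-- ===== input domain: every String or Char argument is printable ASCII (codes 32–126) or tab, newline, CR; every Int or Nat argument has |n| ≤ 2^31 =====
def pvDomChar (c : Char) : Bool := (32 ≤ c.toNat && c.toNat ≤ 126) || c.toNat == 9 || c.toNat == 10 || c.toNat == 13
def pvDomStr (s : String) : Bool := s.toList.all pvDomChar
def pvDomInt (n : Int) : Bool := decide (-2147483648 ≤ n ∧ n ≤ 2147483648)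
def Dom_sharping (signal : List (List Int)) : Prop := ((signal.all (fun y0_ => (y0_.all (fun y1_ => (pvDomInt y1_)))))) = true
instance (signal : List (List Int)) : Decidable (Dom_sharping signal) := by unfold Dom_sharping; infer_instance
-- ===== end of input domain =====

-- B stages the work: one padded difference list, then the second derivative as differences of consecutive first differences; same return value as A on rows of length ≥ 2 (both raise otherwise).

-- ===== PORT A =====
-- signal[i][1], valid under Pre_ (every row has length ≥ 2, index in range)
def pvA_val (signal : List (List Int)) (i : Int) : Int :=
  (PySem.List.pyGet? ((PySem.List.pyGet? signal i).getD []) 1).getD 0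

def sharping (signal : List (List Int)) : List (List Int) × List (List Int) :=
  (PySem.List.pyRange 0 (signal.length : Int) 1).foldl
    (fun (acc : List (List Int) × List (List Int)) i =>
      let x_n := pvA_val signal i
      let x_min_1 := if i = 0 then 0 else pvA_val signal (i - 1)
      let x_plus_1 := if i = (signal.length : Int) - 1 then 0 else pvA_val signal (i + 1)
      (acc.1 ++ [[i, x_n - x_min_1]], acc.2 ++ [[i, x_plus_1 - (2 * x_n) + x_min_1]]))
    ([], [])

-- ===== PORT B =====
-- p[1]; under Pre_ every row has length ≥ 2 so this never defaults
def pvB_val (p : List Int) : Int := (PySem.List.pyGet? p 1).getD 0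

def sharping_alt (signal : List (List Int)) : List (List Int) × List (List Int) :=
  let xs := signal.map pvB_val
  let diffs := List.zipWith (fun a b => b - a) (0 :: xs) (xs ++ [0])
  ((PySem.List.enumerate diffs.dropLast 0).map (fun p => [p.1, p.2]),
   (PySem.List.enumerate (diffs.zip diffs.tail) 0).map (fun p => [p.1, p.2.2 - p.2.1]))

-- ===== PRECONDITION & SPEC =====
-- A indexes signal[i][1]; it raises IndexError on any row of length < 2 (and B raises there too)
def Pre_sharping (signal : List (List Int)) : Prop := ∀ p ∈ signal, 2 ≤ p.length
instance (signal : List (List Int)) : Decidable (Pre_sharping signal) := by unfold Pre_sharping; infer_instance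
def pvWitness_sharping : List (List Int) := [[0, 5], [1, 3], [2, 8]]

def Spec_sharping (signal : List (List Int)) (out : List (List Int) × List (List Int)) : Prop := out = sharping_alt signal
instance (signal : List (List Int)) (out : List (List Int) × List (List Int)) : Decidable (Spec_sharping signal out) := by unfold Spec_sharping; infer_instance

-- ===== CLAIM (what is proved, stated in full; the proofs are below) =====
def Claim_equal_sharping : Prop := ∀ (signal : List (List Int)), Dom_sharping signal → Pre_sharping signal → Spec_sharping signal (sharping signal)

-- ===== LEMMAS AND PROOFS =====

-- A's foldl over the range, appending one element per side, is a pair of maps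
theorem pv_foldl_pair (L : List Int) (f g : Int → List Int) (l1 l2 : List (List Int)) :
    L.foldl (fun (acc : List (List Int) × List (List Int)) i =>
      (acc.1 ++ [f i], acc.2 ++ [g i])) (l1, l2)
    = (l1 ++ L.map f, l2 ++ L.map g) := by
  induction L generalizing l1 l2 with
  | nil => simp
  | cons a t ih => simp [List.foldl, ih]

theorem pvA_val_eq (signal : List (List Int)) (j : Nat) (h : j < signal.length) :
    pvA_val signal (j : Int) = pvB_val signal[j] := by
  simp [pvA_val, pvB_val, PySem.List.pyGet?, PySem.List.pyIdx?, h]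

-- the k-th entry of B's padded difference list
theorem pv_diffs_get (xs : List Int) (k : Nat) (hk : k < xs.length + 1) :
    (List.zipWith (fun a b => b - a) (0 :: xs) (xs ++ [0]))[k]'(by simp; omega)
      = (if h : k < xs.length then xs[k] else 0)
        - (if h : k = 0 then 0 else xs[k - 1]'(by omega)) := by
  rw [List.getElem_zipWith]
  congr 1
  · by_cases h : k < xs.length
    · simp [h, List.getElem_append_left]
    · have : k = xs.length := by omega
      subst this
      simp [List.getElem_append_right]
  · cases k with
    | zero => simp
    | succ m => simp

-- the same entry written through A's accessors
theorem pv_diffs_A (signal : List (List Int)) (k : Nat) (hk : k < signal.length + 1) :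
    (List.zipWith (fun a b => b - a) (0 :: signal.map pvB_val) (signal.map pvB_val ++ [0]))[k]'(by simp; omega)
      = (if k < signal.length then pvA_val signal (k : Int) else 0)
        - (if k = 0 then 0 else pvA_val signal ((k : Int) - 1)) := by
  rw [pv_diffs_get (signal.map pvB_val) k (by simp; omega)]
  congr 1
  · by_cases h : k < signal.length
    · rw [dif_pos (by simp; omega : k < (signal.map pvB_val).length), if_pos h,
          pvA_val_eq signal k h, List.getElem_map]
    · rw [dif_neg (by simp; omega), if_neg h]
  · by_cases h : k = 0
    · simp [h]
    · rw [dif_neg h, if_neg h]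
      have h1 : k - 1 < signal.length := by omega
      have hc : ((k : Int) - 1) = ((k - 1 : Nat) : Int) := by omega
      rw [hc, pvA_val_eq signal (k - 1) h1, List.getElem_map]

-- ===== VERDICT (by name: the statement is the Claim_ definition above) =====
theorem sharping_spec : Claim_equal_sharping := by
  intro signal _ hpre
  show sharping signal = sharping_alt signal
  unfold sharping sharping_alt
  rw [PySem.List.pyRange_zero_natCast, pv_foldl_pair]
  simp only [List.nil_append]
  refine Prod.ext ?_ ?_
  · apply List.ext_getElem
    · simp
    · intro i h1 h2
      have hi : i < signal.length := by simpa using h1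
      simp only [List.getElem_map, List.getElem_range, PySem.List.getElem_enumerate,
        List.getElem_dropLast]
      rw [pv_diffs_A signal i (by omega)]
      rw [if_pos hi]
      by_cases h0 : i = 0
      · subst h0; simp
      · rw [if_neg h0]
        simp
        intro h
        exact absurd h h0
  · apply List.ext_getElem
    · simp
    · intro i h1 h2
      have hi : i < signal.length := by simpa using h1
      simp only [List.getElem_map, List.getElem_range, PySem.List.getElem_enumerate,
        List.getElem_zip, List.getElem_tail]
      rw [pv_diffs_A signal i (by omega)]
      have hcast : ((i + 1 : Nat) : Int) = (i : Int) + 1 := by push_cast; ring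
      rw [show ∀ h, (List.zipWith (fun a b => b - a) (0 :: signal.map pvB_val)
            (signal.map pvB_val ++ [0]))[i + 1]'h
          = (if i + 1 < signal.length then pvA_val signal ((i : Int) + 1) else 0)
            - pvA_val signal (i : Int) from ?_]
      · rw [if_pos hi]
        have hii : (if i = 0 then 0 else pvA_val signal ((i : Int) - 1))
            = (if (i : Int) = 0 then 0 else pvA_val signal ((i : Int) - 1)) := by
          by_cases h : i = 0
          · simp [h]
          · rw [if_neg h, if_neg (by omega : ¬ ((i : Int) = 0))]
        by_cases hlast : i + 1 < signal.length
        · rw [if_pos hlast,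
              if_neg (by omega : ¬ ((i : Int) = (signal.length : Int) - 1)), ← hii]
          ring_nf
        · rw [if_neg hlast, if_pos (by omega : (i : Int) = (signal.length : Int) - 1), ← hii]
          ring_nf
      · intro h
        rw [pv_diffs_A signal (i + 1) (by omega)]
        rw [if_neg (by omega : ¬ (i + 1 = 0)), hcast,
            show ((i : Int) + 1 - 1) = (i : Int) from by ring]
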